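-- pv_equiv track=rewrite | github.com/sunaminusone/email_agent | src/rag/retriever.py | _normalize_phase_label
-- ===== SOURCE A (Python) =====
-- def _normalize_phase_label(raw_value: str) -> str:
--     cleaned = raw_value.strip().upper().replace(" ", "")
--     cleaned = cleaned.replace("PHASE", "")
--     if not cleaned:
--         return ""
--     if "-" in cleaned:
--         prefix, suffix = cleaned.split("-", 1)
--         return f"Phase {prefix}-{suffix}"
--     roman_numerals = ["VIII", "VII", "VI", "IV", "III", "II", "IX", "X", "V", "I"]
--     for numeral in roman_numerals:
--         if cleaned == numeral:
--             return f"Phase {numeral}"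
--         if cleaned.startswith(numeral) and len(cleaned) == len(numeral) + 1:
--             suffix = cleaned[len(numeral):]
--             if suffix.isalpha():
--                 return f"Phase {numeral}-{suffix}"
--     return f"Phase {cleaned}"
-- ===== SOURCE B (Python) =====
-- _VALS = {"I": 1, "V": 5, "X": 10}
--
--
-- def _roman_value(s):
--     """Standard subtractive roman parse over I/V/X; 0 if any char is invalid."""
--     total = 0
--     for i, ch in enumerate(s):
--         if ch not in _VALS:
--             return 0
--         v = _VALS[ch]
--         nxt = _VALS.get(s[i + 1], 0) if i + 1 < len(s) else 0
--         total = total - v if nxt > v else total + v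
--     return total
--
--
-- def _render(v):
--     """Canonical roman rendering by greedy subtraction."""
--     out = ""
--     for value, sym in ((10, "X"), (9, "IX"), (5, "V"), (4, "IV"), (1, "I")):
--         while v >= value:
--             out += sym
--             v -= value
--     return out
--
--
-- def _is_roman10(s):
--     v = _roman_value(s)
--     return 1 <= v <= 10 and _render(v) == s
--
--
-- def _normalize_phase_label(raw_value: str) -> str:
--     cleaned = raw_value.strip().upper().replace(" ", "").replace("PHASE", "")
--     if not cleaned:
--         return ""
--     if "-" in cleaned:
--         prefix, suffix = cleaned.split("-", 1)
--         return f"Phase {prefix}-{suffix}"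
--     if _is_roman10(cleaned):
--         return f"Phase {cleaned}"
--     if _is_roman10(cleaned[:-1]) and cleaned[-1].isalpha():
--         return f"Phase {cleaned[:-1]}-{cleaned[-1]}"
--     return f"Phase {cleaned}"
-- ===== Notes on version B (the rewrite author's own statement) =====
-- stated objective: alternative
-- what changed: Replaced A's ordered scan over the hard-coded list of ten roman numerals (per-numeral equality, prefix and length tests in a loop) with an arithmetic recognizer: a subtractive roman-numeral parser plus a greedy canonical re-render; a string (or its stem) is accepted iff it parses to a value in 1..10 and re-renders to itself, so the ten-element table and its scan disappear.
import Mathlib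
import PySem

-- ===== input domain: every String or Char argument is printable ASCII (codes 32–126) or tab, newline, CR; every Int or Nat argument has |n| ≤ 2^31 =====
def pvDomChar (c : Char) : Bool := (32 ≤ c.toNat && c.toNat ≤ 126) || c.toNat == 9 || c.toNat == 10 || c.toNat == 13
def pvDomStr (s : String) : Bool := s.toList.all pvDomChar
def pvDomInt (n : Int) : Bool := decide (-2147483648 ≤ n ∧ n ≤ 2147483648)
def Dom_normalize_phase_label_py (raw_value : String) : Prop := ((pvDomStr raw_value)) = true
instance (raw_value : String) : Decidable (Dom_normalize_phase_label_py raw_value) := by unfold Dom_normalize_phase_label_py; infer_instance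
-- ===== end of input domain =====

-- B replaces A's ordered scan over the hard-coded list of ten roman numerals with an arithmetic
-- recognizer (subtractive roman parse + greedy canonical re-render, accepted iff the round trip
-- gives the string back and the value is in 1..10); objective: alternative algorithm.

-- ===== PORT A =====
-- cleaned = raw_value.strip().upper().replace(" ", "").replace("PHASE", "")
def pvClean (s : List Char) : List Char :=
  PySem.Chars.replace
    (PySem.Chars.replace (PySem.Chars.upper (PySem.Chars.strip s)) [' '] [])
    ['P','H','A','S','E'] []

def pvRomanNumerals : List (List Char) :=
  [['V','I','I','I'], ['V','I','I'], ['V','I'], ['I','V'], ['I','I','I'],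
   ['I','I'], ['I','X'], ['X'], ['V'], ['I']]

-- A's `for numeral in roman_numerals:` loop; returning from the loop = stopping the recursion
def pvRomanLoop (c : List Char) : List (List Char) → List Char
  | [] => ['P','h','a','s','e',' '] ++ c
  | n :: rest =>
    if c = n then ['P','h','a','s','e',' '] ++ n
    else if PySem.Chars.startswith c n && c.length == n.length + 1 then
      -- suffix = cleaned[len(numeral):]
      if PySem.Chars.strIsalpha (PySem.Chars.slice c (some (n.length : Int)) none) then
        ['P','h','a','s','e',' '] ++ n ++ ['-'] ++ PySem.Chars.slice c (some (n.length : Int)) none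
      else pvRomanLoop c rest
    else pvRomanLoop c rest

def normalize_phase_label_py (raw_value : String) : String :=
  let cleaned := pvClean raw_value.toList
  if cleaned = [] then ""
  else if PySem.Chars.isIn ['-'] cleaned then
    match PySem.Chars.splitOnMax cleaned ['-'] 1 with
    | [p, s] => String.ofList (['P','h','a','s','e',' '] ++ p ++ ['-'] ++ s)
    | _ => ""   -- unreachable: split("-", 1) with '-' present yields exactly two parts
  else String.ofList (pvRomanLoop cleaned pvRomanNumerals)

-- ===== PORT B =====
-- _VALS.get(ch): the 3-entry dict literal, as a direct lookup
def pvVal? (c : Char) : Option Int :=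
  if c = 'I' then some 1 else if c = 'V' then some 5 else if c = 'X' then some 10 else none

-- _roman_value's `for i, ch in enumerate(s)` loop; the lookahead s[i+1] is the head of the tail
def pvRomanValueGo : List Char → Int → Int
  | [], total => total
  | c :: rest, total =>
    match pvVal? c with
    | none => 0        -- early `return 0` on an invalid character
    | some v =>
      let nxt : Int := match rest with | [] => 0 | d :: _ => (pvVal? d).getD 0
      pvRomanValueGo rest (if v < nxt then total - v else total + v)

def pvRenderTable : List (Int × List Char) :=
  [(10, ['X']), (9, ['I','X']), (5, ['V']), (4, ['I','V']), (1, ['I'])]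

-- the inner `while v >= value` loop; fuel 12 suffices on the guarded domain 1 ≤ v ≤ 10
def pvRenderWhile (fuel : Nat) (value : Int) (sym : List Char) (v : Int) (out : List Char) :
    Int × List Char :=
  match fuel with
  | 0 => (v, out)
  | fuel + 1 =>
    if value ≤ v then pvRenderWhile fuel value sym (v - value) (out ++ sym) else (v, out)

def pvRender (v : Int) : List Char :=
  (pvRenderTable.foldl (fun st p => pvRenderWhile 12 p.1 p.2 st.1 st.2) (v, [])).2

def pvIsRoman10 (s : List Char) : Bool :=
  let v := pvRomanValueGo s 0
  decide (1 ≤ v ∧ v ≤ 10) && (pvRender v == s)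

-- B's own copy of the (textually identical) first line of B
def pvCleanB (s : List Char) : List Char :=
  PySem.Chars.replace
    (PySem.Chars.replace (PySem.Chars.upper (PySem.Chars.strip s)) [' '] [])
    ['P','H','A','S','E'] []

def normalize_phase_label_py_alt (raw_value : String) : String :=
  let cleaned := pvCleanB raw_value.toList
  if cleaned = [] then ""
  else if PySem.Chars.isIn ['-'] cleaned then
    match PySem.Chars.splitOnMax cleaned ['-'] 1 with
    | [] => ""          -- unreachable, as in A (split never returns an empty list)
    | p :: rest =>
      match rest with
      | [] => ""        -- unreachable, as in A (split("-", 1) with '-' present yields two parts)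
      | s :: _ => String.ofList (['P','h','a','s','e',' '] ++ p ++ ['-'] ++ s)
  else if pvIsRoman10 cleaned then
    String.ofList (['P','h','a','s','e',' '] ++ cleaned)
  else
    -- cleaned[:-1] / cleaned[-1]  (cleaned is nonempty here, so [-1] cannot raise)
    match PySem.List.pyGet? cleaned (-1) with
    | some last =>
      if pvIsRoman10 (PySem.Chars.slice cleaned none (some (-1))) &&
          PySem.Chars.isalpha last then
        String.ofList (['P','h','a','s','e',' '] ++ PySem.Chars.slice cleaned none (some (-1)) ++ ['-'] ++ [last])
      else String.ofList (['P','h','a','s','e',' '] ++ cleaned)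
    | none => ""

-- ===== PRECONDITION & SPEC =====
def Spec_normalize_phase_label_py (raw_value : String) (out : String) : Prop := out = normalize_phase_label_py_alt raw_value
instance (raw_value : String) (out : String) : Decidable (Spec_normalize_phase_label_py raw_value out) := by unfold Spec_normalize_phase_label_py; infer_instance

-- ===== CLAIM (what is proved, stated in full; the proofs are below) =====
def Claim_equal_normalize_phase_label_py : Prop := ∀ (raw_value : String), Dom_normalize_phase_label_py raw_value → Spec_normalize_phase_label_py raw_value (normalize_phase_label_py raw_value)

-- ===== LEMMAS AND PROOFS =====

-- split(sep, m) produces at most m+1 pieces beyond the accumulator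
lemma pv_go_len (sep : List Char) (fuel : Nat) : ∀ (m : Nat) (l cur : List Char)
    (acc : List (List Char)),
    (PySem.Chars.splitOnMax.go sep fuel m l cur acc).length ≤ acc.length + m + 1 := by
  induction fuel with
  | zero =>
    intro m l cur acc
    simp [PySem.Chars.splitOnMax.go]
  | succ fuel ih =>
    intro m l cur acc
    cases l with
    | nil => simp [PySem.Chars.splitOnMax.go]
    | cons c rest =>
      rw [PySem.Chars.splitOnMax.go]
      split_ifs with hm hsep
      · simp
      · have := ih (m - 1) (List.drop sep.length (c :: rest)) [] (cur.reverse :: acc)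
        calc _ ≤ (cur.reverse :: acc).length + (m - 1) + 1 := this
          _ ≤ acc.length + m + 1 := by simp only [List.length_cons]; omega
      · exact ih m rest (c :: cur) acc

lemma pv_split_len (c : List Char) :
    (PySem.Chars.splitOnMax c ['-'] 1).length ≤ 2 := by
  rw [PySem.Chars.splitOnMax, if_neg (by norm_num)]
  simpa using pv_go_len ['-'] (c.length + 1) 1 c [] []

-- B's round-trip recognizer accepts exactly the ten numerals of A's table
lemma pv_isRoman_iff (c : List Char) :
    pvIsRoman10 c = true ↔ c ∈ pvRomanNumerals := by
  constructor
  · intro h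
    unfold pvIsRoman10 at h
    rw [Bool.and_eq_true, decide_eq_true_iff, beq_iff_eq] at h
    obtain ⟨⟨h1, h10⟩, hr⟩ := h
    set v := pvRomanValueGo c 0 with hv
    clear_value v
    interval_cases v <;> (rw [← hr]; decide)
  · intro h
    simp only [pvRomanNumerals, List.mem_cons, List.not_mem_nil, or_false] at h
    rcases h with rfl | rfl | rfl | rfl | rfl | rfl | rfl | rfl | rfl | rfl <;> decide

lemma pv_pyGet_last (st : List Char) (x : Char) :
    PySem.List.pyGet? (st ++ [x]) (-1) = some x := by
  simp [PySem.List.pyGet?, PySem.List.pyIdx?]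

lemma pv_strIsalpha_single (x : Char) :
    PySem.Chars.strIsalpha [x] = PySem.Chars.isalpha x := by
  simp [PySem.Chars.strIsalpha]

lemma pv_suffix_eq (st : List Char) (x : Char) :
    PySem.Chars.slice (st ++ [x]) (some (st.length : Int)) none = [x] := by
  simp [PySem.Chars.slice_eq_listSlice, PySem.List.slice_from_natCast]

-- a prefix one element shorter than the word is exactly the stem
lemma pv_prefix_unique (st n : List Char) (x : Char)
    (hpre : PySem.Chars.startswith (st ++ [x]) n = true)
    (hlen : (st ++ [x]).length = n.length + 1) : n = st := by
  rw [PySem.Chars.startswith_iff] at hpre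
  have hlen' : n.length = st.length := by
    have := hlen
    simp only [List.length_append, List.length_cons, List.length_nil] at this
    omega
  rw [List.prefix_iff_eq_take] at hpre
  rw [hpre, hlen', List.take_left]

-- no branch of A's loop fires: fall through to the default
lemma pv_loop_default (c : List Char) (ns : List (List Char))
    (h : ∀ n ∈ ns, c ≠ n ∧
      (PySem.Chars.startswith c n = true → c.length = n.length + 1 →
        PySem.Chars.strIsalpha (PySem.Chars.slice c (some (n.length : Int)) none) = false)) :
    pvRomanLoop c ns = ['P','h','a','s','e',' '] ++ c := by
  induction ns with
  | nil => rfl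
  | cons n rest ih =>
    obtain ⟨hne, halpha⟩ := h n (by simp)
    rw [pvRomanLoop, if_neg hne]
    cases hg : (PySem.Chars.startswith c n && c.length == n.length + 1) with
    | false =>
      rw [if_neg (by exact fun h => nomatch h)]
      exact ih (fun m hm => h m (by simp [hm]))
    | true =>
      rw [if_pos rfl]
      obtain ⟨hpre, hlen⟩ := Bool.and_eq_true_iff.mp hg
      rw [if_neg (by rw [halpha hpre (by simpa using hlen)]; exact fun h => nomatch h)]
      exact ih (fun m hm => h m (by simp [hm]))

-- the suffix branch for the stem fires, and no earlier branch can
lemma pv_loop_fire (st : List Char) (x : Char) (ns : List (List Char))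
    (hne : ∀ n ∈ ns, st ++ [x] ≠ n) (hst : st ∈ ns)
    (halpha : PySem.Chars.isalpha x = true) :
    pvRomanLoop (st ++ [x]) ns = ['P','h','a','s','e',' '] ++ st ++ ['-'] ++ [x] := by
  induction ns with
  | nil => exact absurd hst (by simp)
  | cons n rest ih =>
    rw [pvRomanLoop, if_neg (hne n (by simp))]
    by_cases hn : n = st
    · subst hn
      have hg : (PySem.Chars.startswith (n ++ [x]) n && (n ++ [x]).length == n.length + 1) = true := by
        simp [PySem.Chars.startswith_iff]
      rw [hg, if_pos rfl, pv_suffix_eq, pv_strIsalpha_single, if_pos halpha]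
    · have hg : (PySem.Chars.startswith (st ++ [x]) n && (st ++ [x]).length == n.length + 1) = false := by
        cases hb : PySem.Chars.startswith (st ++ [x]) n with
        | false => simp
        | true =>
          rw [Bool.true_and]
          have : ¬ ((st ++ [x]).length = n.length + 1) :=
            fun hlen => hn (pv_prefix_unique st n x hb hlen)
          simpa using this
      rw [hg]
      rw [if_neg (by exact fun h => nomatch h)]
      have hst' : st ∈ rest := by
        rcases List.mem_cons.mp hst with h | h
        · exact absurd h.symm hn
        · exact h
      exact ih (fun m hm => hne m (by simp [hm])) hst'

-- A's roman loop equals B's round-trip recognizer, on any nonempty cleaned string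
lemma pv_roman_eq (c : List Char) (hc : c ≠ []) :
    String.ofList (pvRomanLoop c pvRomanNumerals) =
      (if pvIsRoman10 c then
        String.ofList (['P','h','a','s','e',' '] ++ c)
      else
        match PySem.List.pyGet? c (-1) with
        | some last =>
          if pvIsRoman10 (PySem.Chars.slice c none (some (-1))) &&
              PySem.Chars.isalpha last then
            String.ofList (['P','h','a','s','e',' '] ++ PySem.Chars.slice c none (some (-1)) ++ ['-'] ++ [last])
          else String.ofList (['P','h','a','s','e',' '] ++ c)
        | none => "") := by
  by_cases hmem : pvIsRoman10 c = true
  · rw [if_pos hmem]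
    have hmem' : c ∈ pvRomanNumerals := (pv_isRoman_iff c).mp hmem
    simp only [pvRomanNumerals, List.mem_cons, List.not_mem_nil, or_false] at hmem'
    rcases hmem' with rfl | rfl | rfl | rfl | rfl | rfl | rfl | rfl | rfl | rfl <;> decide
  · rw [if_neg hmem]
    obtain ⟨st, x, rfl⟩ : ∃ st x, c = st ++ [x] := by
      rcases List.eq_nil_or_concat c with h | ⟨st, x, h⟩
      · exact absurd h hc
      · exact ⟨st, x, by simpa [List.concat_eq_append] using h⟩
    have hstem : PySem.Chars.slice (st ++ [x]) none (some (-1)) = st := by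
      rw [PySem.Chars.slice_eq_listSlice, PySem.List.slice_to_neg_one]
      exact List.dropLast_concat ..
    rw [pv_pyGet_last, hstem]
    show String.ofList (pvRomanLoop (st ++ [x]) pvRomanNumerals) =
      if (pvIsRoman10 st && PySem.Chars.isalpha x) = true then
        String.ofList (['P','h','a','s','e',' '] ++ st ++ ['-'] ++ [x])
      else String.ofList (['P','h','a','s','e',' '] ++ (st ++ [x]))
    have hne : ∀ n ∈ pvRomanNumerals, st ++ [x] ≠ n := by
      intro n hn heq
      exact hmem (heq ▸ (pv_isRoman_iff n).mpr hn)
    by_cases hfire : pvIsRoman10 st = true ∧ PySem.Chars.isalpha x = true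
    · rw [if_pos (by rw [hfire.1, hfire.2]; rfl)]
      have hst : st ∈ pvRomanNumerals := (pv_isRoman_iff st).mp hfire.1
      rw [pv_loop_fire st x pvRomanNumerals hne hst hfire.2]
    · rw [if_neg (fun h => hfire (by simpa using h))]
      rw [pv_loop_default (st ++ [x]) pvRomanNumerals ?_]
      intro n hn
      refine ⟨hne n hn, fun hpre hlen => ?_⟩
      have hn_st : n = st := pv_prefix_unique st n x hpre hlen
      subst hn_st
      rw [pv_suffix_eq, pv_strIsalpha_single]
      have hstR : pvIsRoman10 n = true := (pv_isRoman_iff n).mpr hn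
      cases hb : PySem.Chars.isalpha x with
      | false => rfl
      | true => exact absurd ⟨hstR, hb⟩ hfire

-- ===== VERDICT (by name: the statement is the Claim_ definition above) =====
theorem normalize_phase_label_py_spec : Claim_equal_normalize_phase_label_py := by
  intro raw_value _
  unfold Spec_normalize_phase_label_py normalize_phase_label_py normalize_phase_label_py_alt
  rw [show pvCleanB = pvClean from rfl]
  by_cases h0 : pvClean raw_value.toList = []
  · simp [h0]
  · simp only [h0, if_false]
    by_cases hdash : PySem.Chars.isIn ['-'] (pvClean raw_value.toList) = true
    · simp only [hdash, if_true]
      have hlen := pv_split_len (pvClean raw_value.toList)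
      rcases hparts : PySem.Chars.splitOnMax (pvClean raw_value.toList) ['-'] 1 with
        _ | ⟨p, _ | ⟨s, _ | ⟨t, rest⟩⟩⟩
      · rfl
      · rfl
      · rfl
      · rw [hparts] at hlen; simp at hlen
    · simp only [hdash, Bool.false_eq_true, if_false]
      exact pv_roman_eq (pvClean raw_value.toList) h0
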